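-- pv_equiv track=rewrite | github.com/hany0147/algorithm | 프로그래머스/2/131127. 할인 행사/할인 행사.py | solution
-- ===== SOURCE A (Python) =====
-- from copy import deepcopy
--
-- def solution(want, number, discount):
--     answer = 0
--
--     for i in range(len(discount)):
--         tmp = deepcopy(number)
--         if i + 10 > len(discount):
--             break
--         for j in range(i, i + 10):
--             if discount[j] in want and tmp[want.index(discount[j])] > 0:
--                 tmp[want.index(discount[j])] -= 1
--
--         if all(val == 0 for val in tmp):
--             answer += 1
--
--     return answer
-- ===== SOURCE B (Python) =====
-- def solution(want, number, discount):
--     need = dict(zip(want, number))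
--     total = 0
--     for i in range(len(discount) - 9):
--         window = discount[i:i + 10]
--         if all(window.count(w) >= n for w, n in need.items()):
--             total += 1
--     return total
-- ===== Notes on version B (the rewrite author's own statement) =====
-- stated objective: simpler
-- what changed: B builds the requirement dict once with dict(zip(want, number)) and checks each length-10 window by comparing item counts, instead of A's per-window deepcopy of number, simulated decrements and repeated want.index scans; Pre_ excludes malformed inputs with at least one full window (duplicate want entries, number shorter than want, a nonzero count beyond want's length, negative counts), where A's value is an accident of its decrement simulation and B's plain count check is equally defensible.
-- outside the precondition, e.g. on solution(['a'], [-1], ['b', 'b', 'b', 'b', 'b', 'b', 'b', 'b', 'b', 'b']): A returns 0, B returns 1; on solution(['a'], [1, 1], ['a', 'a', 'a', 'a', 'a', 'a', 'a', 'a', 'a', 'a']): A returns 0, B returns 1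
import Mathlib
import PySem

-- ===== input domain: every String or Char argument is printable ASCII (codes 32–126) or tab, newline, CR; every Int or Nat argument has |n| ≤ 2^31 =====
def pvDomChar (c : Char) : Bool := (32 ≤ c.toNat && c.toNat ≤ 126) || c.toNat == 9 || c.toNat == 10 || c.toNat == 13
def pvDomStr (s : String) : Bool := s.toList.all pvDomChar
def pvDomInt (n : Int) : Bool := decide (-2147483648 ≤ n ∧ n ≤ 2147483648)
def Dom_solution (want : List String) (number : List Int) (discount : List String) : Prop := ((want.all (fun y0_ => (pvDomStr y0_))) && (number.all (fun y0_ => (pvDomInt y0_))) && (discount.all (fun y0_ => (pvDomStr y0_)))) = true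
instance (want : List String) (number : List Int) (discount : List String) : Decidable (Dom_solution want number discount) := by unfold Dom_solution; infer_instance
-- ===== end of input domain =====

-- B replaces A's per-window deepcopy-and-decrement simulation (with repeated want.index scans)
-- by a requirement dict built once plus a per-window count comparison; objective: simpler.

-- ===== PORT A =====
-- inner loop body: if discount[j] in want and tmp[want.index(discount[j])] > 0: tmp[want.index(discount[j])] -= 1
def aStep (want : List String) (tmp : List Int) (d : String) : List Int :=
  if d ∈ want ∧ 0 < PySem.List.pyGetD tmp (((PySem.List.index? want d).getD 0 : Nat) : Int) 0 then
    PySem.List.pySetD tmp (((PySem.List.index? want d).getD 0 : Nat) : Int)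
      (PySem.List.pyGetD tmp (((PySem.List.index? want d).getD 0 : Nat) : Int) 0 - 1)
  else tmp

-- the outer 'for i in range(len(discount))' with its break
def aLoop (want : List String) (number : List Int) (discount : List String) :
    List Int → Int → Int
  | [], answer => answer
  | i :: rest, answer =>
    if (discount.length : Int) < i + 10 then answer
    else
      let tmp := (PySem.List.pyRange i (i + 10)).foldl
        (fun tmp j => aStep want tmp (PySem.List.pyGetD discount j "")) number
      aLoop want number discount rest (if tmp.all (· == 0) then answer + 1 else answer)

def solution (want : List String) (number : List Int) (discount : List String) : Int :=
  aLoop want number discount (PySem.List.pyRange 0 (discount.length : Int)) 0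

-- ===== PORT B =====
def solution_alt (want : List String) (number : List Int) (discount : List String) : Int :=
  let need := (want.zip number).foldl (fun d wn => d.insert wn.1 wn.2) PySem.Dict.empty
  (PySem.List.pyRange 0 ((discount.length : Int) - 9)).foldl
    (fun total i =>
      if need.items.all (fun wn =>
          decide (wn.2 ≤ ((PySem.List.slice discount (some i) (some (i + 10))).count wn.1 : Int))) then
        total + 1
      else total) 0

-- ===== PRECONDITION & SPEC =====
-- Pre_ restricts to the natural domain when at least one full window exists: no duplicate want
-- entries, a count for every want entry, nonnegative counts, and any extra number entries zero.
-- On the excluded malformed inputs (duplicate want entries, number shorter than want, a nonzero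
-- count with no want entry, negative counts) A's value is an accident of its decrement simulation
-- (a duplicated or extra requirement slot can never be decremented, a negative one never reaches
-- 0, a missing slot raises) and B's plain count check is equally defensible. With fewer than 10
-- discounts both programs trivially return 0 on any input.
def Pre_solution (want : List String) (number : List Int) (discount : List String) : Prop :=
  (discount.length : Int) < 10 ∨
    (want.Nodup ∧ want.length ≤ number.length ∧ (∀ n ∈ number, 0 ≤ n) ∧
      ∀ n ∈ number.drop want.length, n = 0)
instance (want : List String) (number : List Int) (discount : List String) : Decidable (Pre_solution want number discount) := by unfold Pre_solution; infer_instance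

def pvWitness_solution : List String × List Int × List String :=
  (["a", "b"], [1, 2], ["a", "b", "a", "b", "b", "a", "b", "c", "a", "b"])

def Spec_solution (want : List String) (number : List Int) (discount : List String) (out : Int) : Prop := out = solution_alt want number discount
instance (want : List String) (number : List Int) (discount : List String) (out : Int) : Decidable (Spec_solution want number discount out) := by unfold Spec_solution; infer_instance

-- ===== CLAIM (what is proved, stated in full; the proofs are below) =====
def Claim_equal_solution : Prop := ∀ (want : List String) (number : List Int) (discount : List String), Dom_solution want number discount → Pre_solution want number discount → Spec_solution want number discount (solution want number discount)

-- ===== LEMMAS AND PROOFS =====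

theorem foldRange_window {α : Type} (xs : List String) (f : α → String → α) :
    ∀ (d a : Nat) (t0 : α), a + d ≤ xs.length →
      (PySem.List.pyRange (a : Int) ((a : Int) + (d : Int))).foldl
          (fun t j => f t (PySem.List.pyGetD xs j "")) t0
        = ((xs.drop a).take d).foldl f t0 := by
  intro d
  induction d with
  | zero => intro a t0 h; simp [PySem.List.pyRange_one_eq_nil]
  | succ d ih =>
    intro a t0 h
    have ha : a < xs.length := by omega
    rw [PySem.List.pyRange_one_cons (by push_cast; omega)]
    rw [List.foldl_cons]
    have hdrop : xs.drop a = xs[a] :: xs.drop (a + 1) := List.drop_eq_getElem_cons ha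
    rw [hdrop]
    simp only [List.take_succ_cons, List.foldl_cons]
    have hg : PySem.List.pyGetD xs (a : Int) "" = xs[a] := by
      rw [PySem.List.pyGetD_natCast]; simp [List.getD, ha]
    have hcast : (a : Int) + 1 = ((a + 1 : Nat) : Int) := by push_cast; ring
    have hcast2 : (a : Int) + ((d + 1 : Nat) : Int) = ((a + 1 : Nat) : Int) + (d : Int) := by push_cast; ring
    rw [hg, hcast, hcast2, ih (a + 1) (f t0 xs[a]) (by omega)]

theorem aStep_pyGetD (want : List String) (tmp : List Int) (d : String) (k : Nat)
    (hd : ∀ m, PySem.List.index? want d = some m → m < tmp.length) :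
    PySem.List.pyGetD (aStep want tmp d) (k : Int) 0 =
      if PySem.List.index? want d = some k then
        (if 0 < PySem.List.pyGetD tmp (k : Int) 0 then PySem.List.pyGetD tmp (k : Int) 0 - 1
         else PySem.List.pyGetD tmp (k : Int) 0)
      else PySem.List.pyGetD tmp (k : Int) 0 := by
  unfold aStep
  by_cases hmem : d ∈ want
  · obtain ⟨m, hm⟩ : ∃ m, PySem.List.index? want d = some m :=
      Option.isSome_iff_exists.mp (by rw [PySem.List.index?_isSome_iff]; exact hmem)
    have hmlen : m < tmp.length := hd m hm
    rw [hm]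
    simp only [Option.getD_some]
    by_cases hpos : 0 < PySem.List.pyGetD tmp (m : Int) 0
    · rw [if_pos ⟨hmem, hpos⟩]
      rw [PySem.List.pyGetD_pySetD_natCast tmp m k _ _ hmlen]
      by_cases hkm : k = m
      · subst hkm; simp; simpa using hpos
      · rw [if_neg hkm, if_neg (by intro h; exact hkm (by simpa using h.symm))]
    · rw [if_neg (by rintro ⟨_, h2⟩; exact hpos h2)]
      by_cases hkm : m = k
      · subst hkm; rw [if_pos rfl, if_neg hpos]
      · rw [if_neg (by intro h; exact hkm (by simpa using h))]
  · have hnone : PySem.List.index? want d = none := (PySem.List.index?_eq_none_iff want d).mpr hmem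
    rw [if_neg (by rintro ⟨h1, _⟩; exact hmem h1), hnone]
    simp

theorem aStep_length (want : List String) (tmp : List Int) (d : String) :
    (aStep want tmp d).length = tmp.length := by
  unfold aStep; split <;> simp

theorem aFold_length (want : List String) (W : List String) (tmp : List Int) :
    (W.foldl (aStep want) tmp).length = tmp.length := by
  induction W generalizing tmp with
  | nil => rfl
  | cons w W ih => rw [List.foldl_cons, ih, aStep_length]

theorem aFold_pyGetD (want : List String) (W : List String) (tmp : List Int) (k : Nat)
    (hW : ∀ w ∈ W, ∀ m, PySem.List.index? want w = some m → m < tmp.length) :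
    PySem.List.pyGetD (W.foldl (aStep want) tmp) (k : Int) 0 =
      max (PySem.List.pyGetD tmp (k : Int) 0 -
            (W.countP (fun w => PySem.List.index? want w == some k) : Int))
          (min (PySem.List.pyGetD tmp (k : Int) 0) 0) := by
  induction W generalizing tmp with
  | nil => simp
  | cons w W ih =>
    rw [List.foldl_cons]
    rw [ih (aStep want tmp w) (by intro w' hw' m hm; rw [aStep_length]; exact hW w' (List.mem_cons_of_mem _ hw') m hm)]
    rw [aStep_pyGetD want tmp w k (hW w (List.mem_cons_self) )]
    rw [List.countP_cons]
    by_cases hidx : PySem.List.index? want w = some k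
    · simp only [hidx, beq_self_eq_true, if_true]
      by_cases hpos : 0 < PySem.List.pyGetD tmp (k : Int) 0
      · rw [if_pos hpos]; push_cast; omega
      · rw [if_neg hpos]; push_cast; omega
    · have : (PySem.List.index? want w == some k) = false := by simpa using hidx
      simp only [hidx, this]
      simp

theorem all_zero_iff (t : List Int) :
    t.all (· == 0) = true ↔ ∀ (k : Nat), k < t.length → PySem.List.pyGetD t (k : Int) 0 = 0 := by
  rw [List.all_eq_true]
  constructor
  · intro h k hk
    rw [PySem.List.pyGetD_natCast]
    have := h t[k] (List.getElem_mem hk)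
    simp at this
    simp [List.getD, List.getElem?_eq_getElem hk, this]
  · intro h x hx
    obtain ⟨k, hk, rfl⟩ := List.getElem_of_mem hx
    have := h k hk
    rw [PySem.List.pyGetD_natCast] at this
    simp [List.getD, List.getElem?_eq_getElem hk] at this
    simp [this]

theorem countP_index_first (want : List String) (W : List String) (k : Nat)
    (hk : k < want.length) (hfirst : ∀ j, (hj : j < k) → want[j] ≠ want[k]) :
    W.countP (fun w => PySem.List.index? want w == some k) = W.count want[k] := by
  rw [List.count_eq_countP]
  apply List.countP_congr
  intro w _
  have hiff : PySem.List.index? want w = some k ↔ w = want[k] := by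
    constructor
    · intro h
      obtain ⟨_, hval, _⟩ := PySem.List.getElem_of_index?_eq_some h
      exact hval.symm
    · rintro rfl
      rw [PySem.List.index?_eq_some_iff]
      exact ⟨want.take k, want.drop (k+1), by
        rw [List.getElem_cons_drop]
        exact (List.take_append_drop k want).symm, by simp [hk.le], by
        intro hmem
        obtain ⟨j, hj, hval⟩ := List.getElem_of_mem hmem
        have hjlt : j < k := by simpa [hk.le] using hj
        exact hfirst j hjlt (by simpa [List.getElem_take] using hval)⟩
  constructor
  · intro h; simp at h ⊢; exact hiff.mp h
  · intro h; simp at h ⊢; exact hiff.mpr h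

theorem aLoop_append (want : List String) (number : List Int) (discount : List String)
    (l1 l2 : List Int) (acc : Int)
    (h : ∀ i ∈ l1, i + 10 ≤ (discount.length : Int)) :
    aLoop want number discount (l1 ++ l2) acc =
      aLoop want number discount l2
        (l1.foldl (fun a i =>
          if ((PySem.List.pyRange i (i + 10)).foldl
              (fun tmp j => aStep want tmp (PySem.List.pyGetD discount j "")) number).all (· == 0) then
            a + 1
          else a) acc) := by
  induction l1 generalizing acc with
  | nil => simp
  | cons i l1 ih =>
    rw [List.cons_append]
    show aLoop want number discount (i :: (l1 ++ l2)) acc = _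
    rw [aLoop]
    rw [if_neg (by have := h i (List.mem_cons_self); omega)]
    rw [List.foldl_cons]
    exact ih _ (fun j hj => h j (List.mem_cons_of_mem _ hj))

theorem aLoop_stop (want : List String) (number : List Int) (discount : List String)
    (i : Int) (rest : List Int) (acc : Int) (h : (discount.length : Int) < i + 10) :
    aLoop want number discount (i :: rest) acc = acc := by
  rw [aLoop, if_pos h]

-- with pairwise-distinct want and number parallel to want, the dict's items are exactly the pairs
theorem need_items (want : List String) (number : List Int)
    (hnd : want.Nodup) (hlen : want.length ≤ number.length) :
    ((want.zip number).foldl (fun d wn => d.insert wn.1 wn.2) PySem.Dict.empty).items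
      = want.zip number := by
  have hfst : (want.zip number).map Prod.fst = want := List.map_fst_zip (by omega)
  have h := PySem.Dict.items_foldl_insert_fresh (l := want.zip number)
    (k := Prod.fst) (v := Prod.snd) (d := PySem.Dict.empty)
    (by intro a _; simp) (by rw [hfst]; exact hnd)
  simpa using h

-- A's window check, characterised positionally
theorem windowA_iff (want : List String) (number : List Int) (discount : List String) (i : Int)
    (hW : ∀ w ∈ discount, ∀ m, PySem.List.index? want w = some m → m < number.length)
    (hi : 0 ≤ i) (hin : i + 10 ≤ (discount.length : Int)) :
    (((PySem.List.pyRange i (i + 10)).foldl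
        (fun tmp j => aStep want tmp (PySem.List.pyGetD discount j "")) number).all (· == 0)) = true ↔
      ∀ k, (hk : k < number.length) → 0 ≤ number[k] ∧
        number[k] ≤ ((((discount.drop i.toNat).take 10).countP
          (fun w => PySem.List.index? want w == some k) : Nat) : Int) := by
  have hieq : i = (i.toNat : Int) := by omega
  have hb : i.toNat + 10 ≤ discount.length := by omega
  have hten : ((10 : Nat) : Int) = (10 : Int) := by norm_num
  rw [hieq, ← hten, foldRange_window discount (aStep want) 10 i.toNat number hb]
  rw [all_zero_iff]
  simp only [Int.toNat_natCast]
  simp only [aFold_length]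
  have hWsub : ∀ w ∈ (discount.drop i.toNat).take 10, ∀ m,
      PySem.List.index? want w = some m → m < number.length := by
    intro w hw
    exact hW w (List.mem_of_mem_drop (List.mem_of_mem_take hw))
  have hval : ∀ (k : Nat) (hk : k < number.length),
      PySem.List.pyGetD number (k : Int) 0 = number[k] := by
    intro k hk
    rw [PySem.List.pyGetD_natCast]
    simp [List.getD, List.getElem?_eq_getElem hk]
  constructor
  · intro h k hk
    have := h k hk
    rw [aFold_pyGetD want _ number k (hWsub)] at this
    rw [hval k hk] at this
    omega
  · intro h k hk
    rw [aFold_pyGetD want _ number k (hWsub), hval k hk]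
    have := h k hk
    omega

-- B's window check, characterised positionally
theorem windowB_iff (want : List String) (number : List Int) (discount : List String) (i : Int)
    (hnd : want.Nodup) (hlen : want.length ≤ number.length) :
    (((want.zip number).foldl (fun d wn => d.insert wn.1 wn.2) PySem.Dict.empty).items.all
        (fun wn =>
          decide (wn.2 ≤ ((PySem.List.slice discount (some i) (some (i + 10))).count wn.1 : Int)))) = true ↔
      ∀ k, (hk : k < want.length) →
        number[k]'(by omega) ≤ (((PySem.List.slice discount (some i) (some (i + 10))).count
          want[k] : Nat) : Int) := by
  rw [need_items want number hnd hlen, List.all_eq_true]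
  have hzl : (want.zip number).length = min want.length number.length := List.length_zip
  constructor
  · intro h k hk
    have hp : (want[k], number[k]'(by omega)) ∈ want.zip number := by
      rw [List.mem_iff_getElem]
      exact ⟨k, by omega, by simp [List.getElem_zip]⟩
    simpa using h _ hp
  · intro h wn hwn
    rw [List.mem_iff_getElem] at hwn
    obtain ⟨k, hkz, rfl⟩ := hwn
    simp only [List.getElem_zip, decide_eq_true_eq]
    exact h k (by omega)

-- on the natural domain the two window checks agree
theorem window_eq (want : List String) (number : List Int) (discount : List String) (i : Int)
    (hnd : want.Nodup) (hlen : want.length ≤ number.length) (hnn : ∀ n ∈ number, 0 ≤ n)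
    (hzero : ∀ n ∈ number.drop want.length, n = 0)
    (hi : 0 ≤ i) (hin : i + 10 ≤ (discount.length : Int)) :
    (((PySem.List.pyRange i (i + 10)).foldl
        (fun tmp j => aStep want tmp (PySem.List.pyGetD discount j "")) number).all (· == 0)) =
    (((want.zip number).foldl (fun d wn => d.insert wn.1 wn.2) PySem.Dict.empty).items.all
        (fun wn =>
          decide (wn.2 ≤ ((PySem.List.slice discount (some i) (some (i + 10))).count wn.1 : Int)))) := by
  have hW : ∀ w ∈ discount, ∀ m, PySem.List.index? want w = some m → m < number.length := by
    intro w _ m hm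
    obtain ⟨hmlt, -, -⟩ := PySem.List.getElem_of_index?_eq_some hm
    omega
  have hcount0 : ∀ (W : List String) (k : Nat), want.length ≤ k →
      W.countP (fun w => PySem.List.index? want w == some k) = 0 := by
    intro W k hk
    rw [List.countP_eq_zero]
    intro w _ hc
    obtain ⟨hmlt, -, -⟩ := PySem.List.getElem_of_index?_eq_some (by simpa using hc)
    omega
  have hnum0 : ∀ (k : Nat) (hk : k < number.length), want.length ≤ k → number[k] = 0 := by
    intro k hk hge
    apply hzero
    rw [List.mem_iff_getElem]
    exact ⟨k - want.length, by simp; omega, by rw [List.getElem_drop]; congr 1; omega⟩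
  have hslice : PySem.List.slice discount (some i) (some (i + 10)) = (discount.drop i.toNat).take 10 := by
    rw [PySem.List.slice_toNat discount hi (by omega : (0:Int) ≤ i + 10)]
    congr 1
    omega
  have hfirst : ∀ (k : Nat) (hk : k < want.length), ∀ j, (hj : j < k) →
      want[j]'(by omega) ≠ want[k] := by
    intro k hk j hj he
    have := (List.Nodup.getElem_inj_iff hnd).mp he
    omega
  rw [Bool.eq_iff_iff, windowA_iff want number discount i hW hi hin,
    windowB_iff want number discount i hnd hlen]
  simp only [hslice]
  constructor
  · intro h k hk
    have := (h k (by omega)).2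
    rwa [countP_index_first want _ k (by omega) (hfirst k (by omega))] at this
  · intro h k hk
    refine ⟨hnn _ (List.getElem_mem hk), ?_⟩
    rcases Nat.lt_or_ge k want.length with hkw | hkw
    · rw [countP_index_first want _ k hkw (hfirst k hkw)]
      exact h k hkw
    · rw [hcount0 _ k hkw, hnum0 k hk hkw]
      simp

theorem main_eq (want : List String) (number : List Int) (discount : List String)
    (hpre : Pre_solution want number discount) :
    solution want number discount = solution_alt want number discount := by
  simp only [solution, solution_alt]
  rcases Nat.lt_or_ge discount.length 10 with h10 | h10
  · have hA : aLoop want number discount (PySem.List.pyRange 0 (discount.length : Int)) 0 = 0 := by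
      rcases Nat.eq_zero_or_pos discount.length with h0 | hpos
      · rw [h0, PySem.List.pyRange_one_eq_nil (by norm_num)]
        rfl
      · rw [PySem.List.pyRange_one_cons (by exact_mod_cast hpos)]
        exact aLoop_stop _ _ _ _ _ _ (by omega)
    rw [hA, PySem.List.pyRange_one_eq_nil (by omega)]
    rfl
  · rcases hpre with hlt | ⟨hnd, hlen, hnn, hzero⟩
    · omega
    · rw [PySem.List.pyRange_one_append 0 ((discount.length : Int) - 9) (discount.length : Int)
        (by omega) (by omega)]
      rw [aLoop_append _ _ _ _ _ _ (by
        intro i hi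
        rw [PySem.List.mem_pyRange_one] at hi
        omega)]
      rw [PySem.List.pyRange_one_cons (by omega), aLoop_stop _ _ _ _ _ _ (by omega)]
      apply PySem.List.foldl_congr_mem
      intro acc i hi
      rw [PySem.List.mem_pyRange_one] at hi
      rw [window_eq want number discount i hnd hlen hnn hzero (by omega) (by omega)]

-- ===== VERDICT (by name: the statement is the Claim_ definition above) =====
theorem solution_spec : Claim_equal_solution := by
  intro want number discount _ hpre
  unfold Spec_solution
  exact main_eq want number discount hpre
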